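-- pv_equiv track=rewrite | github.com/Wison05/PythonStudy | week01/2026-01-14_list_dictionary.py | cal_stuff
-- ===== SOURCE A (Python) =====
-- def cal_stuff(cart, item_list):
--     unknown_item = []
--     total_price = 0
--     for item in cart:
--         if item not in item_list:
--             unknown_item.append(item)
--         else:
--             total_price += item_list[item]
--     return unknown_item, total_price
-- ===== SOURCE B (Python) =====
-- def cal_stuff(cart, item_list):
--     counts = {}
--     for item in cart:
--         counts[item] = counts.get(item, 0) + 1
--     total_price = sum(price * counts.get(name, 0) for name, price in item_list.items())
--     unknown_item = [item for item in cart if item not in item_list]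
--     return unknown_item, total_price
-- ===== Notes on version B (the rewrite author's own statement) =====
-- stated objective: alternative
-- what changed: Instead of accumulating the price of each cart entry, B builds a multiplicity counter of the cart once and computes the total by iterating the catalog (item_list), multiplying each price by its cart count; unknown items come from a separate filter of the cart.
import Mathlib
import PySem

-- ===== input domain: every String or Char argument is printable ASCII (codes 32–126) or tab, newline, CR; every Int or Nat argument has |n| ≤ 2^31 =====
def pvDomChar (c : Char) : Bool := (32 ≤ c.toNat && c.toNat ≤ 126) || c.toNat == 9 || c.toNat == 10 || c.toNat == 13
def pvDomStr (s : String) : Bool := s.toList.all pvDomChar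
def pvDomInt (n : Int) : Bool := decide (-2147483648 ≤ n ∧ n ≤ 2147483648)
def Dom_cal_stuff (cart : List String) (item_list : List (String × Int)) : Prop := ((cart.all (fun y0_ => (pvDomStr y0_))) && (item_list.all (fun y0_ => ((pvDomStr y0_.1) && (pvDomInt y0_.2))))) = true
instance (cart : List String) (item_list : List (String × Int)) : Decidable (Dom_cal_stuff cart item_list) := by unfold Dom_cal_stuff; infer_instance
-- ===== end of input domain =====

-- B computes the total by iterating the catalog with a cart-multiplicity counter (instead of summing per cart entry); same output.


-- ===== PORT A =====
-- Port of A: one fold over cart maintaining (unknown_item, total_price).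
def cal_stuff (cart : List String) (item_list : List (String × Int)) : List String × Int :=
  let d := PySem.Dict.ofList item_list
  cart.foldl (fun st item =>
    match d.get? item with
    | none => (st.1 ++ [item], st.2)
    | some v => (st.1, st.2 + v)) ([], 0)

-- ===== PORT B =====
-- Port of B: counts = multiplicity dict of cart; total = Σ over the catalog's items of price * count; unknowns by filtering cart.
def cal_stuff_alt (cart : List String) (item_list : List (String × Int)) : List String × Int :=
  let d := PySem.Dict.ofList item_list
  let counts := cart.foldl (fun c x => c.insert x (c.getD x 0 + 1)) PySem.Dict.empty
  let total := (d.items.map (fun p => p.2 * counts.getD p.1 0)).sum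
  (cart.filter (fun item => !(d.contains item)), total)

-- ===== PRECONDITION & SPEC =====
def Spec_cal_stuff (cart : List String) (item_list : List (String × Int)) (out : List String × Int) : Prop := out = cal_stuff_alt cart item_list
instance (cart : List String) (item_list : List (String × Int)) (out : List String × Int) : Decidable (Spec_cal_stuff cart item_list out) := by unfold Spec_cal_stuff; infer_instance

-- ===== CLAIM (what is proved, stated in full; the proofs are below) =====
def Claim_equal_cal_stuff : Prop := ∀ (cart : List String) (item_list : List (String × Int)), Dom_cal_stuff cart item_list → Spec_cal_stuff cart item_list (cal_stuff cart item_list)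

-- ===== LEMMAS AND PROOFS =====

-- splitting a sum of pointwise sums
theorem pv_sum_map_add {α : Type} (l : List α) (f g : α → Int) :
    (l.map (fun a => f a + g a)).sum = (l.map f).sum + (l.map g).sum := by
  induction l with
  | nil => simp
  | cons x xs ih => simp [ih]; ring

-- with nodup keys, the indicator sum over an assoc list is the lookup
theorem pv_sum_indicator (l : List (String × Int)) (x : String)
    (hnd : (l.map Prod.fst).Nodup) :
    (l.map (fun p => if p.1 = x then p.2 else 0)).sum
      = (Option.map Prod.snd (l.find? (fun p => p.1 == x))).getD 0 := by
  induction l with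
  | nil => simp
  | cons p rest ih =>
    simp only [List.map_cons, List.nodup_cons] at hnd
    by_cases h : p.1 = x
    · subst h
      have hz : (rest.map (fun q => if q.1 = p.1 then q.2 else 0)).sum = 0 := by
        apply List.sum_eq_zero
        intro y hy
        obtain ⟨q, hq, rfl⟩ := List.mem_map.mp hy
        have : q.1 ≠ p.1 := fun he => hnd.1 (List.mem_map.mpr ⟨q, hq, he⟩)
        simp [this]
      simp [List.find?, hz]
    · have hb : (p.1 == x) = false := beq_false_of_ne h
      simp [List.find?, hb, h, ih hnd.2]

-- A's per-cart-entry sum of lookups equals B's per-catalog-entry sum of price*count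
theorem pv_cartsum_eq_itemsum (cart : List String) (d : PySem.Dict String Int)
    (hnd : d.keys.Nodup) :
    (cart.map (fun i => d.getD i 0)).sum
      = (d.items.map (fun p => p.2 * (cart.count p.1 : Int))).sum := by
  induction cart with
  | nil =>
    simp only [List.map_nil, List.sum_nil, List.count_nil]
    symm; apply List.sum_eq_zero
    intro y hy
    obtain ⟨q, _, rfl⟩ := List.mem_map.mp hy
    simp
  | cons x xs ih =>
    have hcount : ∀ p : String × Int,
        ((x :: xs).count p.1 : Int) = (xs.count p.1 : Int) + (if p.1 = x then 1 else 0) := by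
      intro p
      rcases eq_or_ne p.1 x with h | h
      · simp [h]
      · simp [h, Ne.symm h]
    have hstep : (d.items.map (fun p => p.2 * ((x :: xs).count p.1 : Int))).sum
        = (d.items.map (fun p => p.2 * (xs.count p.1 : Int))).sum
          + (d.items.map (fun p => if p.1 = x then p.2 else 0)).sum := by
      rw [← pv_sum_map_add]
      apply congrArg List.sum
      apply List.map_congr_left
      intro p _
      rw [hcount p]
      by_cases h : p.1 = x <;> simp [h] <;> try ring
    have hkeys : (d.items.map Prod.fst).Nodup := by
      simpa [PySem.Dict.keys] using hnd
    have hind := pv_sum_indicator d.items x hkeys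
    have hgetD : d.getD x 0 = (Option.map Prod.snd (d.items.find? (fun p => p.1 == x))).getD 0 := by
      rw [PySem.Dict.getD_eq_get?_getD]
      rfl
    simp only [List.map_cons, List.sum_cons, hstep, ih, ← hind, hgetD]
    ring

-- characterisation of A's loop
theorem pv_fold_eq (cart : List String) (d : PySem.Dict String Int)
    (u : List String) (t : Int) :
    cart.foldl (fun st item =>
      match d.get? item with
      | none => (st.1 ++ [item], st.2)
      | some v => (st.1, st.2 + v)) (u, t)
    = (u ++ cart.filter (fun item => !(d.contains item)),
       t + (cart.map (fun i => d.getD i 0)).sum) := by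
  induction cart generalizing u t with
  | nil => simp
  | cons x xs ih =>
    simp only [List.foldl, List.filter, List.map_cons, List.sum_cons]
    cases h : d.get? x with
    | none =>
      have hc : d.contains x = false := by
        rw [PySem.Dict.contains_eq_isSome_get?, h]; rfl
      have hg : d.getD x 0 = 0 := by rw [PySem.Dict.getD_eq_get?_getD, h]; rfl
      simp [hc, hg, ih]
    | some v =>
      have hc : d.contains x = true := by
        rw [PySem.Dict.contains_eq_isSome_get?, h]; rfl
      have hg : d.getD x 0 = v := by rw [PySem.Dict.getD_eq_get?_getD, h]; rfl
      simp [hc, hg, ih]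
      ring

-- B's counter dict looks up the cart multiplicity
theorem pv_counts_getD (cart : List String) (k : String) :
    (cart.foldl (fun c x => c.insert x (c.getD x 0 + 1)) PySem.Dict.empty).getD k 0
      = (cart.count k : Int) := by
  rw [PySem.Dict.getD_foldl_insert_add_one]
  simp

-- ===== VERDICT (by name: the statement is the Claim_ definition above) =====
theorem cal_stuff_spec : Claim_equal_cal_stuff := by
  intro cart item_list _
  unfold Spec_cal_stuff cal_stuff cal_stuff_alt
  rw [pv_fold_eq cart (PySem.Dict.ofList item_list) [] 0]
  have hmap : ((PySem.Dict.ofList item_list).items.map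
        (fun p => p.2 * (cart.foldl (fun c x => c.insert x (c.getD x 0 + 1)) PySem.Dict.empty).getD p.1 0)).sum
      = ((PySem.Dict.ofList item_list).items.map (fun p => p.2 * (cart.count p.1 : Int))).sum := by
    apply congrArg List.sum
    apply List.map_congr_left
    intro p _
    rw [pv_counts_getD]
  simp only [List.nil_append, hmap,
    pv_cartsum_eq_itemsum cart (PySem.Dict.ofList item_list) (PySem.Dict.nodup_keys_ofList item_list)]
  simp
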